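-- pv_equiv track=rewrite | github.com/cipherDOT/code-wars | 7kyu.py | make_checkered_board
-- ===== SOURCE A (Python) =====
-- def make_checkered_board(n):
--     r = []
--     count = 0
--     for i in range(n):
--         r.append([])
--         for j in range(n):
--             if (count + j) % 2 == 0:
--                 r[i].append('X')
--             else:
--                 r[i].append('O')
--         count += 1
--
--     return r
-- ===== SOURCE B (Python) =====
-- def make_checkered_board(n):
--     row_even = ['X' if j % 2 == 0 else 'O' for j in range(n)]
--     row_odd = ['O' if j % 2 == 0 else 'X' for j in range(n)]
--     return [row_even[:] if i % 2 == 0 else row_odd[:] for i in range(n)]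
-- ===== Notes on version B (the rewrite author's own statement) =====
-- stated objective: alternative
-- what changed: B precomputes the two alternating base rows once and then assembles the board from copies of them, replacing A's nested loops that recompute the cell parity for every cell.
import Mathlib
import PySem

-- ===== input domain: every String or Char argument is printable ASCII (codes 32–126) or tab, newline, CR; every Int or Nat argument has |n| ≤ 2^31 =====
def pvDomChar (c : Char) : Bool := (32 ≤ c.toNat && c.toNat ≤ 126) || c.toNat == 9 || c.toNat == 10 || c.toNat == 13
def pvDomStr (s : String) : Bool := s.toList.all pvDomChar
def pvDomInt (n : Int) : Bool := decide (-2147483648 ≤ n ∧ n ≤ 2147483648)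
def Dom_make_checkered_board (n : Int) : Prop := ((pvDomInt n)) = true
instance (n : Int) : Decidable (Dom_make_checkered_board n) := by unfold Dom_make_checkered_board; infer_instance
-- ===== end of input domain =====

-- B builds the two alternating base rows once and assembles the board from copies of them,
-- instead of A's nested loops recomputing each cell's parity (objective: alternative decomposition).


-- ===== PORT A =====
-- inner loop of A: builds row i by appending 'X'/'O' cell by cell, parity from count
def pvRowA (n : Int) (count : Int) : List String :=
  (PySem.List.pyRange 0 n 1).foldl
    (fun (row : List String) j => if (count + j) % 2 = 0 then row ++ ["X"] else row ++ ["O"]) []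

def make_checkered_board (n : Int) : List (List String) :=
  let res := (PySem.List.pyRange 0 n 1).foldl
    (fun (st : List (List String) × Int) (_i : Int) =>
      (st.1 ++ [pvRowA n st.2], st.2 + 1))
    ([], 0)
  res.1

-- ===== PORT B =====
def make_checkered_board_alt (n : Int) : List (List String) :=
  let row_even := (PySem.List.pyRange 0 n 1).map (fun j => if j % 2 = 0 then "X" else "O")
  let row_odd  := (PySem.List.pyRange 0 n 1).map (fun j => if j % 2 = 0 then "O" else "X")
  (PySem.List.pyRange 0 n 1).map (fun i => if i % 2 = 0 then row_even else row_odd)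

-- ===== PRECONDITION & SPEC =====
def Spec_make_checkered_board (n : Int) (out : List (List String)) : Prop := out = make_checkered_board_alt n
instance (n : Int) (out : List (List String)) : Decidable (Spec_make_checkered_board n out) := by unfold Spec_make_checkered_board; infer_instance

-- ===== CLAIM (what is proved, stated in full; the proofs are below) =====
def Claim_equal_make_checkered_board : Prop := ∀ (n : Int), Dom_make_checkered_board n → Spec_make_checkered_board n (make_checkered_board n)

-- ===== LEMMAS AND PROOFS =====

-- generic: appending one element per item is a map
theorem pv_foldl_append_map {α β : Type} (g : α → β) :
    ∀ (l : List α) (acc : List β), l.foldl (fun row j => row ++ [g j]) acc = acc ++ l.map g := by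
  intro l
  induction l with
  | nil => intro acc; simp
  | cons x xs ih => intro acc; simp [List.foldl, ih]

-- A's inner loop is a map over the range
theorem pvRowA_eq_map (n count : Int) :
    pvRowA n count
      = (PySem.List.pyRange 0 n 1).map (fun j => if (count + j) % 2 = 0 then "X" else "O") := by
  unfold pvRowA
  have hfun : (fun (row : List String) (j : Int) =>
      if (count + j) % 2 = 0 then row ++ ["X"] else row ++ ["O"])
      = fun row j => row ++ [if (count + j) % 2 = 0 then "X" else "O"] := by
    funext row j; split <;> rfl
  rw [hfun, pv_foldl_append_map, List.nil_append]

-- A's outer loop: count starts at c, rows are pvRowA n c, pvRowA n (c+1), …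
theorem pvA_outer (n : Int) :
    ∀ (l : List Int) (acc : List (List String)) (c : Int),
      (l.foldl (fun (st : List (List String) × Int) (_i : Int) =>
          (st.1 ++ [pvRowA n st.2], st.2 + 1)) (acc, c)).1
        = acc ++ (List.range l.length).map (fun (k : Nat) => pvRowA n (c + (k : Int))) := by
  intro l
  induction l with
  | nil => intro acc c; simp
  | cons x xs ih =>
      intro acc c
      simp only [List.foldl]
      rw [ih]
      rw [List.length_cons, List.range_succ_eq_map, List.map_cons, List.map_map]
      simp only [Nat.cast_zero, add_zero, List.append_assoc, List.singleton_append]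
      congr 1
      congr 1
      apply List.map_congr_left
      intro k _
      simp only [Function.comp_apply]
      congr 1
      push_cast
      ring

theorem make_checkered_board_spec : Claim_equal_make_checkered_board := by
  intro n _
  unfold Spec_make_checkered_board make_checkered_board make_checkered_board_alt
  simp only []
  rw [pvA_outer n (PySem.List.pyRange 0 n 1) [] 0]
  rw [PySem.List.length_pyRange_one, PySem.List.pyRange_one 0 n]
  simp only [List.nil_append, List.map_map, Int.sub_zero, Function.comp_def, zero_add]
  apply List.map_congr_left
  intro k _
  rw [pvRowA_eq_map, PySem.List.pyRange_one 0 n, List.map_map]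
  simp only [Int.sub_zero, Function.comp_def, zero_add]
  by_cases h : ((k : Int)) % 2 = 0
  · rw [if_pos h]
    apply List.map_congr_left
    intro j _
    have hiff : ((k : Int) + (j : Int)) % 2 = 0 ↔ ((j : Int) % 2 = 0) := by omega
    by_cases hj : (j : Int) % 2 = 0
    · rw [if_pos (hiff.mpr hj), if_pos hj]
    · rw [if_neg (fun hc => hj (hiff.mp hc)), if_neg hj]
  · rw [if_neg h]
    apply List.map_congr_left
    intro j _
    have hiff : ((k : Int) + (j : Int)) % 2 = 0 ↔ ¬ ((j : Int) % 2 = 0) := by omega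
    by_cases hj : (j : Int) % 2 = 0
    · rw [if_neg (fun hc => (hiff.mp hc) hj), if_pos hj]
    · rw [if_pos (hiff.mpr hj), if_neg hj]
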